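-- pv_equiv track=rewrite | github.com/ShAd0W-byte/nonoise | nonoise/collector.py | canonical_key
-- ===== SOURCE A (Python) =====
-- SEPARATORS = ['/', '?', '&', '=', '#', '$']
--
-- def canonical_key(url: str) -> str:
--     """Cut URL at the LAST occurring structural separator"""
--     last_pos = -1
--
--     for sep in SEPARATORS:
--         pos = url.rfind(sep)
--         if pos > last_pos:
--             last_pos = pos
--
--     if last_pos == -1:
--         return url
--
--     return url[:last_pos + 1]
-- ===== SOURCE B (Python) =====
-- SEPARATORS = ['/', '?', '&', '=', '#', '$']
--
-- def canonical_key(url: str) -> str: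
--     """Cut URL at the LAST occurring structural separator"""
--     seps = set(SEPARATORS)
--     for i in range(len(url) - 1, -1, -1):
--         if url[i] in seps:
--             return url[:i + 1]
--     return url
-- ===== Notes on version B (the rewrite author's own statement) =====
-- stated objective: idiomatic
-- what changed: Replaces six full-string rfind scans (one per separator) with a single right-to-left scan over the URL's characters that stops at the first separator found.
import Mathlib
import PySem

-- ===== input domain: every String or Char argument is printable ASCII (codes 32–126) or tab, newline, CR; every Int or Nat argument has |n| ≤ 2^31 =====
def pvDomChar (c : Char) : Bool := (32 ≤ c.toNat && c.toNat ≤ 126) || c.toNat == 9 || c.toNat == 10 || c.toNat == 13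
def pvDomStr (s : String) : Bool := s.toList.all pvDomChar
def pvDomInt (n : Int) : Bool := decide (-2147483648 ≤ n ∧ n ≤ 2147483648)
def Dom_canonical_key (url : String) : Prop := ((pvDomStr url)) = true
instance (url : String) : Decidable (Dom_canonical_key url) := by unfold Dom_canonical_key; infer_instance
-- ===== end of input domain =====

-- B replaces A's six per-separator rfind scans with one right-to-left character scan (idiomatic; same return value).

-- ===== PORT A =====
def pvSEPARATORS : List String := ["/", "?", "&", "=", "#", "$"]

def canonical_key (url : String) : String :=
  let last_pos : Int :=
    pvSEPARATORS.foldl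
      (fun last_pos sep =>
        let pos := PySem.Str.rfind url sep
        if pos > last_pos then pos else last_pos)
      (-1)
  if last_pos = -1 then url
  else PySem.Str.slice url none (some (last_pos + 1))

-- ===== PORT B =====
def pvSepSet : PySem.Set Char := PySem.Set.ofList ['/', '?', '&', '=', '#', '$']

-- right-to-left scan: look in the suffix (the later indices) first; only if no
-- separator is there, test the current character; yields url[:i+1] for the last
-- separator index i, or none when there is no separator at all.
def canonicalScan : List Char → Option (List Char)
  | [] => none
  | c :: rest =>
    match canonicalScan rest with
    | some r => some (c :: r)
    | none => if PySem.Set.contains pvSepSet c then some [c] else none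

def canonical_key_alt (url : String) : String :=
  match canonicalScan url.toList with
  | some p => String.ofList p
  | none => url

-- ===== PRECONDITION & SPEC =====
def Spec_canonical_key (url : String) (out : String) : Prop := out = canonical_key_alt url
instance (url : String) (out : String) : Decidable (Spec_canonical_key url out) := by unfold Spec_canonical_key; infer_instance

-- ===== CLAIM (what is proved, stated in full; the proofs are below) =====
def Claim_equal_canonical_key : Prop := ∀ (url : String), Dom_canonical_key url → Spec_canonical_key url (canonical_key url)

-- ===== LEMMAS AND PROOFS =====

def sepChars : List Char := ['/', '?', '&', '=', '#', '$']

-- A's inner fold, over the character lists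
def maxR (l : List Char) (seps : List Char) (m : Int) : Int :=
  seps.foldl
    (fun m d =>
      let pos := PySem.Chars.rfind l [d]
      if pos > m then pos else m) m

theorem maxR_nil' (l : List Char) (m : Int) : maxR l [] m = m := rfl

theorem maxR_cons (l : List Char) (d : Char) (seps : List Char) (m : Int) :
    maxR l (d :: seps) m
      = maxR l seps (if PySem.Chars.rfind l [d] > m then PySem.Chars.rfind l [d] else m) := rfl

theorem singleton_isPrefixOf_append (d : Char) (x y : List Char) (hx : x ≠ []) :
    List.isPrefixOf [d] (x ++ y) = List.isPrefixOf [d] x := by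
  cases x with
  | nil => exact absurd rfl hx
  | cons a t => simp [List.isPrefixOf]

theorem go_succ (s : List Char) (d : Char) (j : Nat) :
    PySem.Chars.rfind.go s [d] (j+1)
      = if List.isPrefixOf [d] (s.drop (j+1)) then ((j:Int)+1) else PySem.Chars.rfind.go s [d] j := by
  simp [PySem.Chars.rfind.go]

theorem go_le (s : List Char) (d : Char) (k : Nat) :
    PySem.Chars.rfind.go s [d] k ≤ (k : Int) := by
  induction k with
  | zero => simp [PySem.Chars.rfind.go]; split <;> simp
  | succ j ih =>
    rw [go_succ]
    split
    · simp
    · exact le_trans ih (by omega)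

theorem go_append (s : List Char) (c d : Char) (k : Nat) (hk : k < s.length) :
    PySem.Chars.rfind.go (s ++ [c]) [d] k = PySem.Chars.rfind.go s [d] k := by
  induction k with
  | zero =>
    simp only [PySem.Chars.rfind.go]
    rw [singleton_isPrefixOf_append d s [c] (by intro h; simp [h] at hk)]
  | succ j ih =>
    rw [go_succ, go_succ]
    rw [List.drop_append_of_le_length (by omega),
        singleton_isPrefixOf_append d (s.drop (j+1)) [c] (by simp; omega),
        ih (by omega)]

theorem rfind_lt_length (s : List Char) (d : Char) :
    PySem.Chars.rfind s [d] < (s.length : Int) := by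
  unfold PySem.Chars.rfind
  cases h : s.length with
  | zero => simp [PySem.Chars.rfind.go]; split <;> simp_all
  | succ n =>
    rw [go_succ]
    rw [show s.drop (n+1) = [] from by apply List.drop_eq_nil_of_le; omega]
    simp only [List.isPrefixOf, if_false, Bool.false_eq_true]
    have := go_le s d n
    omega

theorem rfind_concat (s : List Char) (c d : Char) :
    PySem.Chars.rfind (s ++ [c]) [d]
      = if d = c then (s.length : Int) else PySem.Chars.rfind s [d] := by
  unfold PySem.Chars.rfind
  rw [show (s ++ [c]).length = s.length + 1 from by simp]
  rw [go_succ]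
  rw [show (s ++ [c]).drop (s.length+1) = [] from by apply List.drop_eq_nil_of_le; simp]
  simp only [List.isPrefixOf, if_false, Bool.false_eq_true]
  cases hs : s.length with
  | zero =>
    have hse : s = [] := List.eq_nil_of_length_eq_zero hs
    subst hse
    simp only [List.nil_append, PySem.Chars.rfind.go, List.isPrefixOf, Nat.cast_zero]
    by_cases hdc : d = c
    · subst hdc; simp
    · simp [hdc]
  | succ n =>
    rw [go_succ]
    rw [show (s ++ [c]).drop (n+1) = [c] from by
      rw [List.drop_append_of_le_length (by omega)]
      rw [show s.drop (n+1) = [] from by apply List.drop_eq_nil_of_le; omega]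
      simp]
    rw [go_append s c d n (by omega)]
    rw [go_succ]
    rw [show s.drop (n+1) = [] from by apply List.drop_eq_nil_of_le; omega]
    simp only [List.isPrefixOf, if_false, Bool.false_eq_true]
    by_cases hdc : d = c
    · subst hdc
      rw [if_pos (by simp), if_pos rfl]
      push_cast; ring
    · simp [hdc]

theorem maxR_of_all_le (l : List Char) (seps : List Char) (m : Int)
    (h : ∀ d, PySem.Chars.rfind l [d] ≤ m) : maxR l seps m = m := by
  induction seps with
  | nil => rfl
  | cons d seps ih =>
    rw [maxR_cons, if_neg (by have := h d; omega)]
    exact ih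

theorem maxR_concat (l : List Char) (c : Char) (seps : List Char) (m : Int)
    (hm : m <= (l.length : Int)) :
    maxR (l ++ [c]) seps m = if c ∈ seps then (l.length : Int) else maxR l seps m := by
  induction seps generalizing m with
  | nil => simp [maxR_nil']
  | cons d seps ih =>
    rw [maxR_cons, rfind_concat]
    by_cases hdc : d = c
    · subst hdc
      rw [if_pos rfl]
      rw [show (if (l.length:Int) > m then (l.length:Int) else m) = (l.length:Int) from by omega]
      rw [ih (l.length : Int) (le_refl _)]
      by_cases hc : d ∈ seps
      · rw [if_pos hc, if_pos (by simp)]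
      · rw [if_neg hc,
            maxR_of_all_le l seps (l.length : Int)
              (fun d' => le_of_lt (rfind_lt_length l d')),
            if_pos (by simp)]
    · rw [if_neg hdc]
      have hlt := rfind_lt_length l d
      rw [ih (if PySem.Chars.rfind l [d] > m then PySem.Chars.rfind l [d] else m)
            (by split <;> omega)]
      rw [maxR_cons]
      by_cases hc : c ∈ seps
      · rw [if_pos hc, if_pos (List.mem_cons_of_mem d hc)]
      · have hnc : c ∉ d :: seps := by
          intro h
          rcases List.mem_cons.mp h with h | h
          · exact hdc h.symm
          · exact hc h
        rw [if_neg hc, if_neg hnc]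

theorem contains_iff (c : Char) :
    PySem.Set.contains pvSepSet c = true ↔ c ∈ sepChars := by
  have h : pvSepSet = sepChars := by decide
  rw [h, PySem.Set.contains]
  exact List.contains_iff_mem

theorem scan_concat (l : List Char) (c : Char) :
    canonicalScan (l ++ [c])
      = if c ∈ sepChars then some (l ++ [c]) else canonicalScan l := by
  induction l with
  | nil =>
    simp only [List.nil_append, canonicalScan]
    by_cases hc : c ∈ sepChars
    · rw [if_pos ((contains_iff c).2 hc), if_pos hc]
    · rw [if_neg (by intro h; exact hc ((contains_iff c).1 h)), if_neg hc]
  | cons a l ih =>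
    simp only [List.cons_append, canonicalScan, ih]
    by_cases hc : c ∈ sepChars
    · simp [hc]
    · simp [hc]

theorem maxR_nil : maxR [] sepChars (-1) = -1 := by decide

-- joint characterisation of A's max-rfind fold and B's right-to-left scan
theorem main_char (l : List Char) :
    (maxR l sepChars (-1) = -1 ∧ canonicalScan l = none) ∨
    (∃ n : Nat, n < l.length ∧ maxR l sepChars (-1) = (n : Int) ∧
      canonicalScan l = some (l.take (n+1))) := by
  induction l using List.reverseRecOn with
  | nil => exact Or.inl ⟨maxR_nil, rfl⟩
  | append_singleton l c ih =>
    rw [maxR_concat l c sepChars (-1) (by omega), scan_concat]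
    by_cases hc : c ∈ sepChars
    · refine Or.inr ⟨l.length, by simp, by simp [hc], ?_⟩
      rw [if_pos hc, List.take_of_length_le (by simp)]
    · rw [if_neg hc, if_neg hc]
      rcases ih with ⟨h1, h2⟩ | ⟨n, hn, h1, h2⟩
      · exact Or.inl ⟨h1, h2⟩
      · refine Or.inr ⟨n, by simp; omega, h1, ?_⟩
        rw [h2, List.take_append_of_le_length (by omega)]

theorem canonical_key_eq (url : String) :
    canonical_key url
      = if maxR url.toList sepChars (-1) = -1 then url
        else PySem.Str.slice url none (some (maxR url.toList sepChars (-1) + 1)) := rfl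

-- ===== VERDICT (by name: the statement is the Claim_ definition above) =====
theorem canonical_key_spec : Claim_equal_canonical_key := by
  intro url _
  unfold Spec_canonical_key canonical_key_alt
  rw [canonical_key_eq]
  rcases main_char url.toList with ⟨h1, h2⟩ | ⟨n, hn, h1, h2⟩
  · rw [h1, h2]; simp
  · rw [h1, h2]
    rw [if_neg (by omega)]
    apply String.toList_inj.mp
    rw [PySem.Str.toList_slice, PySem.Chars.slice_eq_listSlice]
    rw [show ((n:Int) + 1) = ((n+1 : Nat) : Int) from by push_cast; ring]
    rw [PySem.List.slice_to_natCast]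
    simp [String.toList_ofList]
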